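-- pv_equiv track=rewrite | github.com/rsarwas/aoc | 2018-16/answers.py | parse2
-- ===== SOURCE A (Python) =====
-- def parse2(lines):
--     empty_line_count = 0
--     ops = []
--     for line in lines:
--         line = line.strip()
--         if empty_line_count == 3:
--             ops.append([int(i) for i in line.split()])
--         else:
--             if not line:
--                 empty_line_count += 1
--             else:
--                 empty_line_count = 0
--     return ops
-- ===== SOURCE B (Python) =====
-- def parse2(lines):
--     # Phase 1: strip once, find the end of the first run of 3 consecutive blank lines.
--     stripped = [line.strip() for line in lines]
--     start = None
--     empties = 0
--     for i, l in enumerate(stripped):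
--         empties = empties + 1 if not l else 0
--         if empties == 3:
--             start = i + 1
--             break
--     if start is None:
--         return []
--     # Phase 2: parse everything after the boundary.
--     return [[int(x) for x in l.split()] for l in stripped[start:]]
-- ===== Notes on version B (the rewrite author's own statement) =====
-- stated objective: alternative
-- what changed: A interleaves boundary detection and parsing in one stateful loop over all lines; B strips once, runs a separate early-terminating boundary search for the first run of 3 blank stripped lines, and then parses only the tail slice with a comprehension.
import Mathlib
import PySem

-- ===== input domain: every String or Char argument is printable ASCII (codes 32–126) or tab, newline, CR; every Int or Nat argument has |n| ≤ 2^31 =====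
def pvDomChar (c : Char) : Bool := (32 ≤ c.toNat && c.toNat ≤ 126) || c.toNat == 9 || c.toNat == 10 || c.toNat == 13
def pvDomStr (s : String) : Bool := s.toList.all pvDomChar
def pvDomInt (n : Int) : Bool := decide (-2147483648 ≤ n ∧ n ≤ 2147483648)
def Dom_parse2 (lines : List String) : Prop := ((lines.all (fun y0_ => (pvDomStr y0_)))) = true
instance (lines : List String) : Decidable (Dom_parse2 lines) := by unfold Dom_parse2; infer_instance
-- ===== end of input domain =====

-- B is an alternative decomposition (strip once, find the 3-blank boundary with early exit, parse the tail
-- slice); equal return values are proved on Pre_, which excludes exactly the inputs where Python raises ValueError.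

-- ===== PORT A =====
-- one stateful loop: count consecutive blanks until 3, then parse every later line.
-- int(w) is PySem.Int.ofStr?; the .getD 0 is unreachable under Pre_parse2 (Python raises there).
def parse2 (lines : List String) : List (List Int) :=
  (lines.foldl
    (fun (s : Nat × List (List Int)) (line : String) =>
      let l := PySem.Str.strip line
      if s.1 == 3 then
        (s.1, s.2 ++ [(PySem.Str.split₀ l).map (fun w => (PySem.Int.ofStr? w).getD 0)])
      else if l == "" then (s.1 + 1, s.2) else (0, s.2))
    (0, [])).2

-- ===== PORT B =====
-- boundary search of Source B: walk the stripped lines with an index and a blank counter, return i+1 on the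
-- first run of 3 consecutive blanks (early exit), none if there is no boundary.
def parse2FindStart : List String → Nat → Nat → Option Nat
  | [], _, _ => none
  | l :: rest, i, empties =>
    let e' := if l == "" then empties + 1 else 0
    if e' == 3 then some (i + 1) else parse2FindStart rest (i + 1) e'

def parse2_alt (lines : List String) : List (List Int) :=
  let stripped := lines.map PySem.Str.strip
  match parse2FindStart stripped 0 0 with
  | none => []
  | some start =>
    (stripped.drop start).map (fun l => (PySem.Str.split₀ l).map (fun w => (PySem.Int.ofStr? w).getD 0))

-- ===== PRECONDITION & SPEC =====
-- Pre_ excludes exactly the inputs where Python's int() raises ValueError: some line after the first run of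
-- three consecutive blank (stripped) lines contains a token that is not an int literal.
def Pre_parse2 (lines : List String) : Prop :=
  ∀ i < lines.length,
    (∃ j < i, j + 3 ≤ i ∧ ∀ k < 3, PySem.Str.strip (lines.getD (j + k) "") = "") →
    ∀ w ∈ PySem.Str.split₀ (PySem.Str.strip (lines.getD i "")), (PySem.Int.ofStr? w).isSome = true
instance (lines : List String) : Decidable (Pre_parse2 lines) := by unfold Pre_parse2; infer_instance

def pvWitness_parse2 : List String := ["begin", "", "", "", "1 2 3", "", "-4 5"]

def Spec_parse2 (lines : List String) (out : List (List Int)) : Prop := out = parse2_alt lines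
instance (lines : List String) (out : List (List Int)) : Decidable (Spec_parse2 lines out) := by unfold Spec_parse2; infer_instance

-- ===== CLAIM (what is proved, stated in full; the proofs are below) =====
def Claim_equal_parse2 : Prop := ∀ (lines : List String), Dom_parse2 lines → Pre_parse2 lines → Spec_parse2 lines (parse2 lines)

-- ===== LEMMAS AND PROOFS =====

-- the per-line parser both ports apply after the boundary
def pvParseLine (l : String) : List Int :=
  (PySem.Str.split₀ l).map (fun w => (PySem.Int.ofStr? w).getD 0)

-- A's loop body, on an already-stripped line
def pvStepA (s : Nat × List (List Int)) (l : String) : Nat × List (List Int) :=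
  if s.1 == 3 then (s.1, s.2 ++ [pvParseLine l])
  else if l == "" then (s.1 + 1, s.2) else (0, s.2)

lemma parse2_eq_fold_stripped (lines : List String) :
    parse2 lines = ((lines.map PySem.Str.strip).foldl pvStepA (0, [])).2 := by
  simp [parse2, List.foldl_map, pvStepA, pvParseLine]

-- once the counter is 3, the loop just parses every remaining line
lemma foldA_three (ls : List String) (acc : List (List Int)) :
    (ls.foldl pvStepA (3, acc)).2 = acc ++ ls.map pvParseLine := by
  induction ls generalizing acc with
  | nil => simp
  | cons l rest ih => simp [pvStepA, ih]

-- the boundary search ignores its index parameter up to a shift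
lemma findStart_shift (ls : List String) (i e : Nat) :
    parse2FindStart ls i e = (parse2FindStart ls 0 e).map (· + i) := by
  induction ls generalizing i e with
  | nil => simp [parse2FindStart]
  | cons l rest ih =>
    by_cases hl : (l == "") = true <;>
      simp only [parse2FindStart, hl, if_true, Bool.false_eq_true, if_false]
    · by_cases h3 : (e + 1 == 3) = true
      · simp [h3]; omega
      · simp only [h3, Bool.false_eq_true, if_false]
        rw [ih (i + 1) (e + 1), ih 1 (e + 1)]
        cases parse2FindStart rest 0 (e + 1) <;> simp; omega
    · simp only [show ((0 : Nat) == 3) = false from rfl, Bool.false_eq_true, if_false]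
      rw [ih (i + 1) 0, ih 1 0]
      cases parse2FindStart rest 0 0 <;> simp; omega

-- main invariant: below the boundary, A's loop equals "find boundary, parse the tail"
lemma foldA_main (ls : List String) (c : Nat) (acc : List (List Int)) (hc : c < 3) :
    (ls.foldl pvStepA (c, acc)).2 =
      acc ++ (match parse2FindStart ls 0 c with
              | none => []
              | some s => (ls.drop s).map pvParseLine) := by
  induction ls generalizing c acc with
  | nil => simp [parse2FindStart]
  | cons l rest ih =>
    have hc3 : (c == 3) = false := by simp; omega
    by_cases hl : (l == "") = true
    · by_cases h3 : (c + 1 == 3) = true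
      · have hc1 : c + 1 = 3 := by simpa using h3
        simp only [List.foldl_cons, pvStepA, hc3, hl, if_true, Bool.false_eq_true,
          if_false, parse2FindStart, hc1]
        rw [foldA_three]
        simp
      · have hlt : c + 1 < 3 := by simp at h3; omega
        simp only [List.foldl_cons, pvStepA, hc3, hl, if_true, Bool.false_eq_true, if_false,
          parse2FindStart, h3]
        rw [ih (c + 1) acc hlt, findStart_shift rest 1 (c + 1)]
        cases parse2FindStart rest 0 (c + 1) <;> simp
    · simp only [List.foldl_cons, pvStepA, hc3, hl, Bool.false_eq_true, if_false,
        parse2FindStart, show ((0 : Nat) == 3) = false from rfl]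
      rw [ih 0 acc (by omega), findStart_shift rest 1 0]
      cases parse2FindStart rest 0 0 <;> simp

-- ===== VERDICT (by name: the statement is the Claim_ definition above) =====
theorem parse2_spec : Claim_equal_parse2 := by
  intro lines _ _
  show parse2 lines = parse2_alt lines
  rw [parse2_eq_fold_stripped, foldA_main _ 0 [] (by omega)]
  simp only [parse2_alt, List.nil_append]
  cases h : parse2FindStart (lines.map PySem.Str.strip) 0 0
  · simp
  · rfl
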